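-- pv_equiv track=rewrite | github.com/duoyuan1/video-fission-workflow | workflow/video_render_provider.py | summarize_episode_status
-- ===== SOURCE A (Python) =====
-- from typing import Any
--
-- NON_TERMINAL_STATUSES = {"submitted", "queued", "in_progress"}
--
-- def summarize_episode_status(segments: list[dict[str, Any]]) -> str:
--     statuses = [item.get("status", "") for item in segments]
--     if not statuses:
--         return "failed"
--     if any(status in NON_TERMINAL_STATUSES for status in statuses):
--         return "in_progress"
--     if any(status == "failed" for status in statuses):
--         return "failed"
--     if all(status == "skipped" for status in statuses):
--         return "skipped"
--     if all(status == "completed" for status in statuses):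
--         return "completed"
--     if all(status in {"completed", "skipped"} for status in statuses):
--         return "completed"
--     return "submitted"
-- ===== SOURCE B (Python) =====
-- NON_TERMINAL_STATUSES = {"submitted", "queued", "in_progress"}
--
-- def summarize_episode_status(segments):
--     if not segments:
--         return "failed"
--     any_nonterminal = any_failed = any_completed = any_skipped = any_other = False
--     for item in segments:
--         s = item.get("status", "")
--         if s in NON_TERMINAL_STATUSES:
--             any_nonterminal = True
--         elif s == "failed":
--             any_failed = True
--         elif s == "completed":
--             any_completed = True
--         elif s == "skipped":
--             any_skipped = True
--         else:
--             any_other = True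
--     if any_nonterminal:
--         return "in_progress"
--     if any_failed:
--         return "failed"
--     if any_other:
--         return "submitted"
--     return "completed" if any_completed else "skipped"
-- ===== Notes on version B (the rewrite author's own statement) =====
-- stated objective: simpler
-- what changed: Replaces A's materialised status list plus five separate any/all scans with a single pass that classifies each segment's status into five boolean flags and then applies the priority ladder on the flags.
import Mathlib
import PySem

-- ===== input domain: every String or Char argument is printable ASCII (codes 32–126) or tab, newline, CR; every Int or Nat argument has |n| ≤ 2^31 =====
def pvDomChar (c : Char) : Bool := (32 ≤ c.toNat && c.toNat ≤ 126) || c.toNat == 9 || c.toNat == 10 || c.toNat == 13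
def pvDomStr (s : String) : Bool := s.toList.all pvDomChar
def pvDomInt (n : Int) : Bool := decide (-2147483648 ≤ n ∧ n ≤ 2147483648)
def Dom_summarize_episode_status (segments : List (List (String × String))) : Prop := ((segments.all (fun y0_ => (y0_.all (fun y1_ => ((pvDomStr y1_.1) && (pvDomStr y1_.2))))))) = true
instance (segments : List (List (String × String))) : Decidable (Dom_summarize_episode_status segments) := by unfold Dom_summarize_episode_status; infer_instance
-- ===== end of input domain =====

-- B replaces A's five separate any/all scans over a materialised status list with one
-- flag-accumulating pass followed by a priority ladder; objective: simpler (same O(n) cost).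


-- ===== PORT A =====
-- item.get("status", "") on the association list: first match, exact for Python dict.get
def pvGetStatus (item : List (String × String)) : String :=
  ((item.find? (fun p => p.1 == "status")).map Prod.snd).getD ""

def summarize_episode_status (segments : List (List (String × String))) : String :=
  let statuses := segments.map pvGetStatus
  if statuses.isEmpty then "failed"
  else if statuses.any (fun s => s == "submitted" || s == "queued" || s == "in_progress") then "in_progress"
  else if statuses.any (fun s => s == "failed") then "failed"
  else if statuses.all (fun s => s == "skipped") then "skipped"
  else if statuses.all (fun s => s == "completed") then "completed"
  else if statuses.all (fun s => s == "completed" || s == "skipped") then "completed"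
  else "submitted"

-- ===== PORT B =====
-- flags = (any_nonterminal, any_failed, any_completed, any_skipped, any_other)
def altStep (f : Bool × Bool × Bool × Bool × Bool) (item : List (String × String)) :
    Bool × Bool × Bool × Bool × Bool :=
  let s := pvGetStatus item
  if s == "submitted" || s == "queued" || s == "in_progress" then
    (true, f.2.1, f.2.2.1, f.2.2.2.1, f.2.2.2.2)
  else if s == "failed" then (f.1, true, f.2.2.1, f.2.2.2.1, f.2.2.2.2)
  else if s == "completed" then (f.1, f.2.1, true, f.2.2.2.1, f.2.2.2.2)
  else if s == "skipped" then (f.1, f.2.1, f.2.2.1, true, f.2.2.2.2)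
  else (f.1, f.2.1, f.2.2.1, f.2.2.2.1, true)

def summarize_episode_status_alt (segments : List (List (String × String))) : String :=
  if segments.isEmpty then "failed"
  else
    let f := segments.foldl altStep (false, false, false, false, false)
    if f.1 then "in_progress"
    else if f.2.1 then "failed"
    else if f.2.2.2.2 then "submitted"
    else if f.2.2.1 then "completed"
    else "skipped"

-- ===== PRECONDITION & SPEC =====
def Spec_summarize_episode_status (segments : List (List (String × String))) (out : String) : Prop := out = summarize_episode_status_alt segments
instance (segments : List (List (String × String))) (out : String) : Decidable (Spec_summarize_episode_status segments out) := by unfold Spec_summarize_episode_status; infer_instance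

-- ===== CLAIM (what is proved, stated in full; the proofs are below) =====
def Claim_equal_summarize_episode_status : Prop := ∀ (segments : List (List (String × String))), Dom_summarize_episode_status segments → Spec_summarize_episode_status segments (summarize_episode_status segments)

-- ===== LEMMAS AND PROOFS =====

def ntP (s : String) : Bool := s == "submitted" || s == "queued" || s == "in_progress"
def otP (s : String) : Bool :=
  !(ntP s) && !(s == "failed") && !(s == "completed") && !(s == "skipped")

lemma altStep_eq (f : Bool × Bool × Bool × Bool × Bool) (item : List (String × String)) :
    altStep f item =
      (f.1 || ntP (pvGetStatus item),
       f.2.1 || (pvGetStatus item == "failed"),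
       f.2.2.1 || (pvGetStatus item == "completed"),
       f.2.2.2.1 || (pvGetStatus item == "skipped"),
       f.2.2.2.2 || otP (pvGetStatus item)) := by
  unfold altStep
  generalize pvGetStatus item = s
  by_cases h1 : ntP s = true
  · have hs : (s = "submitted" ∨ s = "queued") ∨ s = "in_progress" := by
      simpa [ntP] using h1
    rcases hs with (h | h) | h <;> subst h <;> simp [ntP, otP]
  · rw [if_neg (by simpa [ntP] using h1)]
    by_cases h2 : s = "failed"
    · subst h2; simp [ntP, otP] at h1 ⊢
    · rw [if_neg (by simpa using h2)]
      by_cases h3 : s = "completed"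
      · subst h3; simp [ntP, otP] at h1 ⊢
      · rw [if_neg (by simpa using h3)]
        by_cases h4 : s = "skipped"
        · subst h4; simp [ntP, otP] at h1 ⊢
        · rw [if_neg (by simpa using h4)]
          simp [ntP, otP] at h1 ⊢
          simp [h1, h2, h3, h4]

lemma fold_flags (segs : List (List (String × String))) (a b c d e : Bool) :
    segs.foldl altStep (a, b, c, d, e) =
      (a || segs.any (fun i => ntP (pvGetStatus i)),
       b || segs.any (fun i => pvGetStatus i == "failed"),
       c || segs.any (fun i => pvGetStatus i == "completed"),
       d || segs.any (fun i => pvGetStatus i == "skipped"),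
       e || segs.any (fun i => otP (pvGetStatus i))) := by
  induction segs generalizing a b c d e with
  | nil => simp
  | cons hd tl ih =>
    simp only [List.foldl_cons, List.any_cons, altStep_eq]
    rw [ih]
    simp [Bool.or_assoc]

lemma ladder_eq (l : List String) :
    (if l.any ntP = true then "in_progress"
     else if l.any (fun s => s == "failed") = true then "failed"
     else if l.all (fun s => s == "skipped") = true then "skipped"
     else if l.all (fun s => s == "completed") = true then "completed"
     else if l.all (fun s => s == "completed" || s == "skipped") = true then "completed"
     else "submitted")
    = (if l.any ntP = true then "in_progress"
       else if l.any (fun s => s == "failed") = true then "failed"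
       else if l.any otP = true then "submitted"
       else if l.any (fun s => s == "completed") = true then "completed"
       else "skipped") := by
  by_cases h1 : l.any ntP = true
  · simp [h1]
  · rw [if_neg h1, if_neg h1]
    by_cases h2 : l.any (fun s => s == "failed") = true
    · simp [h2]
    · rw [if_neg h2, if_neg h2]
      by_cases h3 : l.any otP = true
      · rw [if_pos h3]
        obtain ⟨x, hx, hox⟩ := List.any_eq_true.mp h3
        have hnt : ntP x = false := by
          cases hnt : ntP x
          · rfl
          · simp [otP, hnt] at hox
        rw [if_neg, if_neg, if_neg]
        · simp only [List.all_eq_true]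
          intro hall
          have := hall x hx
          simp only [Bool.or_eq_true, beq_iff_eq] at this
          rcases this with h | h <;> (subst h; simp [otP, ntP] at hox)
        · simp only [List.all_eq_true]
          intro hall
          have := hall x hx
          simp only [beq_iff_eq] at this
          subst this; simp [otP, ntP] at hox
        · simp only [List.all_eq_true]
          intro hall
          have := hall x hx
          simp only [beq_iff_eq] at this
          subst this; simp [otP, ntP] at hox
      · rw [if_neg h3]
        have hcs : ∀ x ∈ l, x = "completed" ∨ x = "skipped" := by
          intro x hx
          by_cases hcx : x = "completed"
          · exact Or.inl hcx
          by_cases hsx : x = "skipped"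
          · exact Or.inr hsx
          exfalso
          apply h3
          refine List.any_eq_true.mpr ⟨x, hx, ?_⟩
          have hnt : ntP x = false := by
            cases hnt : ntP x
            · rfl
            · exact absurd (List.any_eq_true.mpr ⟨x, hx, hnt⟩) h1
          have hf : (x == "failed") = false := by
            cases hf : (x == "failed")
            · rfl
            · exact absurd (List.any_eq_true.mpr ⟨x, hx, hf⟩) h2
          simp [otP, hnt, hf, hcx, hsx]
        by_cases h4 : l.any (fun s => s == "completed") = true
        · rw [if_pos h4]
          obtain ⟨x, hx, hcx⟩ := List.any_eq_true.mp h4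
          rw [if_neg]
          · by_cases h5 : l.all (fun s => s == "completed") = true
            · rw [if_pos h5]
            · rw [if_neg h5, if_pos]
              simp only [List.all_eq_true]
              intro y hy
              rcases hcs y hy with h | h <;> simp [h]
          · simp only [List.all_eq_true]
            intro hall
            have := hall x hx
            simp at hcx
            simp [hcx] at this
        · rw [if_neg h4, if_pos]
          simp only [List.all_eq_true]
          intro y hy
          rcases hcs y hy with h | h
          · exfalso
            refine h4 (List.any_eq_true.mpr ⟨y, hy, ?_⟩)
            simp [h]
          · simp [h]

-- ===== VERDICT (by name: the statement is the Claim_ definition above) =====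
theorem summarize_episode_status_spec : Claim_equal_summarize_episode_status := by
  intro segments _
  unfold Spec_summarize_episode_status summarize_episode_status summarize_episode_status_alt
  rcases segments with _ | ⟨hd, tl⟩
  · simp
  · rw [fold_flags]
    have key := ladder_eq ((hd :: tl).map pvGetStatus)
    simp only [List.any_map, List.all_map, Function.comp_def, ntP, otP] at key
    simpa [ntP, otP, Function.comp_def] using key
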